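-- pv_equiv track=rewrite | github.com/DeepshikhaSingh18/MapUp-DA-Assessment-2024 | submissions/python_section_1.py | rotate_and_multiply_matrix
-- ===== SOURCE A (Python) =====
-- from typing import Dict, List
--
-- def rotate_and_multiply_matrix(matrix: List[List[int]]) -> List[List[int]]:
--     """
--     Rotate the given matrix by 90 degrees clockwise, then multiply each element
--     by the sum of its original row and column index before rotation.
--
--     Args:
--     - matrix (List[List[int]]): 2D list representing the matrix to be transformed.
--
--     Returns:
--     - List[List[int]]: A new 2D list representing the transformed matrix.
--     """
--     # Your code here
--     n = len(matrix)
--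
--     # Step 1: Rotate the matrix by 90 degrees clockwise
--     rotated = [[0] * n for _ in range(n)]
--     for i in range(n):
--         for j in range(n):
--             rotated[j][n - 1 - i] = matrix[i][j]
--
--     # Step 2: Create a new matrix for the transformed result
--     transformed = [[0] * n for _ in range(n)]
--     # Step 3: Calculate the transformed values
--     for i in range(n):
--         for j in range(n):
--             # Calculate the sum of original row and column indices
--             original_row_sum = i
--             original_col_sum = j
--             index_sum = original_row_sum + original_col_sum
--
--             # Multiply the element in the rotated matrix by the index sum
--             transformed[i][j] = rotated[i][j] * index_sum
--
--     return transformed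
-- ===== SOURCE B (Python) =====
-- def rotate_and_multiply_matrix(matrix):
--     # Reverse-then-transpose by consuming each source row with its own iterator:
--     # at step r, next() on the c-th iterator (over matrix[n-1-c]) yields
--     # matrix[n-1-c][r]; scale by (r + c). No buffers, no index arithmetic.
--     n = len(matrix)
--     its = [iter(row) for row in reversed(matrix)]
--     return [[next(it) * (r + c) for c, it in enumerate(its)] for r in range(n)]
-- ===== Notes on version B (the rewrite author's own statement) =====
-- stated objective: simpler
-- what changed: B replaces A's two preallocated zero-buffer passes with index-arithmetic writes by a reverse-then-transpose that consumes each source row sequentially through its own iterator, scaling by r+c as it emits each output row; no intermediate matrices and no write-by-index at all.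
import Mathlib
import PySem

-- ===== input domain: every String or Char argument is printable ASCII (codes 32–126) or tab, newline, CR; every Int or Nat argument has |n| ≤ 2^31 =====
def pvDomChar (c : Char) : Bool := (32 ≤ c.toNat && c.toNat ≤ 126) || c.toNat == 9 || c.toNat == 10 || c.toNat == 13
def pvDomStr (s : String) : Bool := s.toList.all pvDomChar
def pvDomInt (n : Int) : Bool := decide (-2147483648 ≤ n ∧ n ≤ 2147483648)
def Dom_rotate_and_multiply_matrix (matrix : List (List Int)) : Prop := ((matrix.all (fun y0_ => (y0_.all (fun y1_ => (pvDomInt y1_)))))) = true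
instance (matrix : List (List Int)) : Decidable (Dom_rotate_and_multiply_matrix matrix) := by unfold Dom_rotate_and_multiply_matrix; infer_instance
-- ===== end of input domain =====

-- B replaces A's two preallocated-buffer index-writing passes by a reverse-then-transpose
-- that consumes each source row sequentially with its own iterator (simpler, no buffers).

-- shared 2D read (matrix[r][c]; in-bounds on every Pre_ input, where Python returns normally)
def pvGet2 (m : List (List Int)) (r c : Nat) : Int := (m.getD r []).getD c 0

-- in-place 2D write (rotated[r][c] = v / transformed[r][c] = v)
def pvSet2 (m : List (List Int)) (r c : Nat) (v : Int) : List (List Int) :=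
  m.set r ((m.getD r []).set c v)

-- ===== PORT A =====
def rotate_and_multiply_matrix (matrix : List (List Int)) : List (List Int) :=
  let n := matrix.length
  let zeros : List (List Int) := List.replicate n (List.replicate n 0)
  -- Step 1: rotated[j][n-1-i] = matrix[i][j]
  let rotated := (List.range n).foldl (fun acc i =>
    (List.range n).foldl (fun acc j => pvSet2 acc j (n - 1 - i) (pvGet2 matrix i j)) acc) zeros
  -- Steps 2–3: transformed[i][j] = rotated[i][j] * (i + j)
  (List.range n).foldl (fun acc i =>
    (List.range n).foldl (fun acc j =>
      pvSet2 acc i j (pvGet2 rotated i j * ((i : Int) + (j : Int)))) acc) zeros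

-- ===== PORT B =====
-- an iterator over a Python list = the list suffix not yet consumed; next(it) = head
-- (headD 0 is exact wherever next() returns, i.e. on every Pre_ input; Python raises there otherwise)
-- one output row per step r: next(it) * (r + c) for each iterator; then all iterators advance
def pvRows : Nat → Nat → List (List Int) → List (List Int)
  | 0, _, _ => []
  | k + 1, r, its =>
      ((PySem.List.enumerate its).map (fun p => p.2.headD 0 * ((r : Int) + p.1)))
        :: pvRows k (r + 1) (its.map List.tail)

def rotate_and_multiply_matrix_alt (matrix : List (List Int)) : List (List Int) :=
  pvRows matrix.length 0 matrix.reverse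

-- ===== PRECONDITION & SPEC =====
-- Pre_ excludes exactly the ragged inputs (some row shorter than the matrix), on which
-- the Python A raises IndexError (and B raises StopIteration there too).
def Pre_rotate_and_multiply_matrix (matrix : List (List Int)) : Prop :=
  ∀ row ∈ matrix, matrix.length ≤ row.length
instance (matrix : List (List Int)) : Decidable (Pre_rotate_and_multiply_matrix matrix) := by
  unfold Pre_rotate_and_multiply_matrix; infer_instance
def pvWitness_rotate_and_multiply_matrix : List (List Int) := [[1, 2], [3, 4]]

def Spec_rotate_and_multiply_matrix (matrix : List (List Int)) (out : List (List Int)) : Prop := out = rotate_and_multiply_matrix_alt matrix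
instance (matrix : List (List Int)) (out : List (List Int)) : Decidable (Spec_rotate_and_multiply_matrix matrix out) := by unfold Spec_rotate_and_multiply_matrix; infer_instance

-- ===== CLAIM (what is proved, stated in full; the proofs are below) =====
def Claim_equal_rotate_and_multiply_matrix : Prop := ∀ (matrix : List (List Int)), Dom_rotate_and_multiply_matrix matrix → Pre_rotate_and_multiply_matrix matrix → Spec_rotate_and_multiply_matrix matrix (rotate_and_multiply_matrix matrix)

-- ===== LEMMAS AND PROOFS =====

theorem pv_tail_getD (l : List Int) (t : Nat) : l.tail.getD t 0 = l.getD (t + 1) 0 := by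
  cases l <;> simp

theorem pv_map_tail_getD (its : List (List Int)) (c : Nat) :
    (its.map List.tail).getD c [] = (its.getD c []).tail := by
  rcases Nat.lt_or_ge c its.length with h | h
  · simp [List.getD_eq_getElem?_getD, List.getElem?_eq_getElem h]
  · rw [List.getD_eq_getElem?_getD, List.getD_eq_getElem?_getD,
      List.getElem?_eq_none (by simpa using h), List.getElem?_eq_none h]
    rfl

-- closed form of B's consuming transpose
theorem pvRows_closed (k : Nat) : ∀ (r : Nat) (its : List (List Int)),
    pvRows k r its = (List.range k).map (fun t =>
      (List.range its.length).map (fun c =>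
        (its.getD c []).getD t 0 * ((r : Int) + t + c))) := by
  induction k with
  | zero => intro r its; rfl
  | succ k ih =>
    intro r its
    rw [show pvRows (k + 1) r its
        = ((PySem.List.enumerate its).map (fun p => p.2.headD 0 * ((r : Int) + p.1)))
          :: pvRows k (r + 1) (its.map List.tail) from rfl,
      ih (r + 1) (its.map List.tail), List.range_succ_eq_map]
    congr 1
    · apply List.ext_getElem
      · simp [PySem.List.length_enumerate]
      · intro c h1 h2
        have hc : c < its.length := by simpa [PySem.List.length_enumerate] using h1
        simp [PySem.List.getElem_enumerate, List.getD_eq_getElem?_getD,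
          List.getElem?_eq_getElem hc, List.head?_eq_getElem?]
    · rw [List.map_map]
      apply List.map_congr_left
      intro t _
      simp only [Function.comp, List.length_map]
      apply List.map_congr_left
      intro c _
      rw [pv_map_tail_getD, pv_tail_getD]
      congr 1
      push_cast
      ring

-- well-shaped buffer: n rows, each of length n
def PvShape (n : Nat) (m : List (List Int)) : Prop :=
  m.length = n ∧ ∀ row ∈ m, row.length = n

theorem pvShape_zeros (n : Nat) : PvShape n (List.replicate n (List.replicate (n:Nat) (0:Int))) := by
  refine ⟨by simp, ?_⟩
  intro row h
  rw [List.eq_of_mem_replicate h]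
  simp

theorem pv_row_len {n : Nat} {m : List (List Int)} (h : PvShape n m) {r : Nat}
    (hr : r < m.length) : (m.getD r []).length = n := by
  have e : m.getD r [] = m[r] := by
    rw [List.getD_eq_getElem?_getD, List.getElem?_eq_getElem hr]; rfl
  rw [e]
  exact h.2 _ (List.getElem_mem hr)

theorem pvShape_set2 {n : Nat} {m : List (List Int)} (h : PvShape n m) (r c : Nat) (v : Int) :
    PvShape n (pvSet2 m r c v) := by
  by_cases hr : r < m.length
  · refine ⟨by simpa [pvSet2] using h.1, ?_⟩
    intro row hrow
    rcases List.mem_or_eq_of_mem_set hrow with hm | hm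
    · exact h.2 _ hm
    · rw [hm, List.length_set]
      exact pv_row_len h hr
  · have e : pvSet2 m r c v = m := by
      unfold pvSet2
      exact List.set_eq_of_length_le (by omega)
    rw [e]; exact h

theorem pvGet2_set2 {n : Nat} {m : List (List Int)} (h : PvShape n m)
    (r c : Nat) (hr : r < n) (hc : c < n) (v : Int) (r' c' : Nat) :
    pvGet2 (pvSet2 m r c v) r' c' = if r' = r ∧ c' = c then v else pvGet2 m r' c' := by
  have hlen : m.length = n := h.1
  have hrm : r < m.length := by omega
  have hrow : (m.getD r []).length = n := pv_row_len h hrm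
  unfold pvGet2 pvSet2
  have houter : (m.set r ((m.getD r []).set c v)).getD r' []
      = if r' = r then (m.getD r []).set c v else m.getD r' [] := by
    by_cases e : r' = r
    · subst e
      simp [List.getD_eq_getElem?_getD, List.getElem?_set_self hrm]
    · rw [List.getD_eq_getElem?_getD, List.getElem?_set_ne (fun hh => e hh.symm),
        if_neg e, List.getD_eq_getElem?_getD]
  rw [houter]
  by_cases e1 : r' = r
  · subst e1
    rw [if_pos rfl]
    by_cases e2 : c' = c
    · subst e2
      rw [if_pos ⟨rfl, rfl⟩, List.getD_eq_getElem?_getD,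
        List.getElem?_set_self (by omega), Option.getD_some]
    · rw [if_neg (fun hh => e2 hh.2)]
      simp [List.getD_eq_getElem?_getD, List.getElem?_set_ne (fun hh => e2 hh.symm)]
  · rw [if_neg e1, if_neg (fun hh => e1 hh.1)]

theorem pvGet2_zeros (n r c : Nat) :
    pvGet2 (List.replicate n (List.replicate (n:Nat) (0:Int))) r c = 0 := by
  unfold pvGet2
  by_cases hr : r < n <;> by_cases hc : c < n <;>
    simp [List.getD_eq_getElem?_getD, hr, hc]

-- entries of the rotated buffer of port A after the first k outer iterations
theorem pv_rot_loop (matrix : List (List Int)) (n : Nat) (k : Nat) (hk : k ≤ n) :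
    PvShape n ((List.range k).foldl (fun acc i =>
        (List.range n).foldl (fun acc j => pvSet2 acc j (n - 1 - i) (pvGet2 matrix i j)) acc)
        (List.replicate n (List.replicate n 0))) ∧
    ∀ r c : Nat,
      pvGet2 ((List.range k).foldl (fun acc i =>
        (List.range n).foldl (fun acc j => pvSet2 acc j (n - 1 - i) (pvGet2 matrix i j)) acc)
        (List.replicate n (List.replicate n 0))) r c
      = if r < n ∧ c < n ∧ n - k ≤ c then pvGet2 matrix (n - 1 - c) r else 0 := by
  have inner : ∀ (i : Nat), i < n → ∀ (acc : List (List Int)), PvShape n acc →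
      ∀ (m : Nat), m ≤ n →
      PvShape n ((List.range m).foldl (fun a j => pvSet2 a j (n - 1 - i) (pvGet2 matrix i j)) acc) ∧
      ∀ r c, pvGet2 ((List.range m).foldl (fun a j => pvSet2 a j (n - 1 - i) (pvGet2 matrix i j)) acc) r c
        = if r < m ∧ c = n - 1 - i then pvGet2 matrix i r else pvGet2 acc r c := by
    intro i hi acc hacc m
    induction m with
    | zero => intro _; exact ⟨hacc, by intro r c; simp⟩
    | succ m ih =>
      intro hm
      obtain ⟨ihS, ihG⟩ := ih (by omega)
      rw [List.range_succ, List.foldl_append, List.foldl_cons, List.foldl_nil]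
      refine ⟨pvShape_set2 ihS _ _ _, ?_⟩
      intro r c
      rw [pvGet2_set2 ihS m (n - 1 - i) (by omega) (by omega) _ r c, ihG r c]
      by_cases e2 : c = n - 1 - i
      · subst e2
        by_cases e1 : r = m
        · subst e1
          rw [if_pos ⟨rfl, rfl⟩, if_pos ⟨by omega, rfl⟩]
        · have hrr : r < m + 1 ↔ r < m := by omega
          simp [e1, hrr]
      · simp [e2]
  induction k with
  | zero =>
    refine ⟨pvShape_zeros n, ?_⟩
    intro r c
    rw [List.range_zero, List.foldl_nil, pvGet2_zeros]
    have hno : ¬(r < n ∧ c < n ∧ n - 0 ≤ c) := by omega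
    rw [if_neg hno]
  | succ k ih =>
    obtain ⟨ihS, ihG⟩ := ih (by omega)
    rw [List.range_succ, List.foldl_append, List.foldl_cons, List.foldl_nil]
    obtain ⟨sS, sG⟩ := inner k (by omega) _ ihS n (le_refl n)
    refine ⟨sS, ?_⟩
    intro r c
    rw [sG r c, ihG r c]
    by_cases e2 : c = n - 1 - k
    · subst e2
      have hkk : n - 1 - (n - 1 - k) = k := by omega
      by_cases e3 : r < n
      · have h1 : ¬(r < n ∧ n - 1 - k < n ∧ n - k ≤ n - 1 - k) := by omega
        have h2 : r < n ∧ n - 1 - k < n ∧ n - (k + 1) ≤ n - 1 - k := by omega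
        rw [if_pos ⟨e3, rfl⟩, if_pos h2, hkk]
      · have h1 : ¬(r < n ∧ (n - 1 - k : Nat) = n - 1 - k) := fun hh => e3 hh.1
        have h2 : ¬(r < n ∧ n - 1 - k < n ∧ n - k ≤ n - 1 - k) := fun hh => e3 hh.1
        have h3 : ¬(r < n ∧ n - 1 - k < n ∧ n - (k + 1) ≤ n - 1 - k) := fun hh => e3 hh.1
        rw [if_neg h1, if_neg h2, if_neg h3]
    · have h1 : ¬(r < n ∧ c = n - 1 - k) := fun hh => e2 hh.2
      have h2 : (r < n ∧ c < n ∧ n - k ≤ c) ↔ (r < n ∧ c < n ∧ n - (k + 1) ≤ c) := by omega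
      rw [if_neg h1]
      simp only [h2]

-- entries of the transformed buffer (port A's second double loop), generic source read v
theorem pv_tr_loop (n : Nat) (v : Nat → Nat → Int) (k : Nat) (hk : k ≤ n) :
    PvShape n ((List.range k).foldl (fun acc i =>
        (List.range n).foldl (fun acc j => pvSet2 acc i j (v i j)) acc)
        (List.replicate n (List.replicate n 0))) ∧
    ∀ r c : Nat,
      pvGet2 ((List.range k).foldl (fun acc i =>
        (List.range n).foldl (fun acc j => pvSet2 acc i j (v i j)) acc)
        (List.replicate n (List.replicate n 0))) r c
      = if r < k ∧ c < n then v r c else 0 := by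
  have inner : ∀ (i : Nat), i < n → ∀ (acc : List (List Int)), PvShape n acc →
      ∀ (m : Nat), m ≤ n →
      PvShape n ((List.range m).foldl (fun a j => pvSet2 a i j (v i j)) acc) ∧
      ∀ r c, pvGet2 ((List.range m).foldl (fun a j => pvSet2 a i j (v i j)) acc) r c
        = if r = i ∧ c < m then v i c else pvGet2 acc r c := by
    intro i hi acc hacc m
    induction m with
    | zero => intro _; exact ⟨hacc, by intro r c; simp⟩
    | succ m ih =>
      intro hm
      obtain ⟨ihS, ihG⟩ := ih (by omega)
      rw [List.range_succ, List.foldl_append, List.foldl_cons, List.foldl_nil]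
      refine ⟨pvShape_set2 ihS _ _ _, ?_⟩
      intro r c
      rw [pvGet2_set2 ihS i m hi (by omega) _ r c, ihG r c]
      by_cases e1 : r = i
      · subst e1
        by_cases e2 : c = m
        · subst e2
          rw [if_pos ⟨rfl, rfl⟩, if_pos ⟨rfl, by omega⟩]
        · have hcc : c < m + 1 ↔ c < m := by omega
          simp [e2, hcc]
      · simp [e1]
  induction k with
  | zero =>
    refine ⟨pvShape_zeros n, ?_⟩
    intro r c
    rw [List.range_zero, List.foldl_nil, pvGet2_zeros]
    simp
  | succ k ih =>
    obtain ⟨ihS, ihG⟩ := ih (by omega)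
    rw [List.range_succ, List.foldl_append, List.foldl_cons, List.foldl_nil]
    obtain ⟨sS, sG⟩ := inner k (by omega) _ ihS n (le_refl n)
    refine ⟨sS, ?_⟩
    intro r c
    rw [sG r c, ihG r c]
    by_cases e1 : r = k
    · rw [e1]
      by_cases e2 : c < n
      · rw [if_pos ⟨rfl, e2⟩]
        rw [if_pos (show k < k + 1 ∧ c < n from ⟨by omega, e2⟩)]
      · have h2 : ¬((k:Nat) = k ∧ c < n) := fun hh => e2 hh.2
        have h3 : ¬(k < k ∧ c < n) := by omega
        have h4 : ¬(k < k + 1 ∧ c < n) := fun hh => e2 hh.2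
        rw [if_neg h2, if_neg h3, if_neg h4]
    · have h1 : ¬(r = k ∧ c < n) := fun hh => e1 hh.1
      have h2 : (r < k ∧ c < n) ↔ (r < k + 1 ∧ c < n) := by omega
      rw [if_neg h1]
      simp only [h2]

theorem pvGet2_eq_getElem {m : List (List Int)} {r c : Nat}
    (hr : r < m.length) (hc : c < (m[r]).length) :
    pvGet2 m r c = (m[r])[c] := by
  have e1 : m.getD r [] = m[r] := by
    rw [List.getD_eq_getElem?_getD, List.getElem?_eq_getElem hr]; rfl
  unfold pvGet2
  rw [e1, List.getD_eq_getElem?_getD, List.getElem?_eq_getElem hc]; rfl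

-- B as a closed-form map over target coordinates
theorem pvAlt_closed (matrix : List (List Int)) :
    rotate_and_multiply_matrix_alt matrix
      = (List.range matrix.length).map (fun r =>
          (List.range matrix.length).map (fun c =>
            pvGet2 matrix (matrix.length - 1 - c) r * ((r : Int) + (c : Int)))) := by
  unfold rotate_and_multiply_matrix_alt
  rw [pvRows_closed]
  simp only [List.length_reverse]
  apply List.map_congr_left
  intro t ht
  apply List.map_congr_left
  intro c hc
  have hcn : c < matrix.length := List.mem_range.mp hc
  have hrev : matrix.reverse.getD c [] = matrix.getD (matrix.length - 1 - c) [] := by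
    rw [List.getD_eq_getElem?_getD, List.getD_eq_getElem?_getD,
      List.getElem?_eq_getElem (by simpa using hcn),
      List.getElem?_eq_getElem (show matrix.length - 1 - c < matrix.length by omega)]
    simp [List.getElem_reverse]
  unfold pvGet2
  rw [hrev]
  congr 1
  push_cast
  ring

-- ===== VERDICT (by name: the statement is the Claim_ definition above) =====
theorem rotate_and_multiply_matrix_spec : Claim_equal_rotate_and_multiply_matrix := by
  intro matrix _ _
  unfold Spec_rotate_and_multiply_matrix
  obtain ⟨rotS, rotG⟩ := pv_rot_loop matrix matrix.length matrix.length (le_refl _)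
  obtain ⟨trS, trG⟩ := pv_tr_loop matrix.length
    (fun i j => pvGet2 ((List.range matrix.length).foldl (fun acc i =>
        (List.range matrix.length).foldl (fun acc j =>
          pvSet2 acc j (matrix.length - 1 - i) (pvGet2 matrix i j)) acc)
        (List.replicate matrix.length (List.replicate matrix.length 0))) i j * ((i : Int) + (j : Int))) matrix.length (le_refl _)
  have hA : rotate_and_multiply_matrix matrix
      = (List.range matrix.length).foldl (fun acc i =>
          (List.range matrix.length).foldl (fun acc j =>
            pvSet2 acc i j (pvGet2 ((List.range matrix.length).foldl (fun acc i =>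
        (List.range matrix.length).foldl (fun acc j =>
          pvSet2 acc j (matrix.length - 1 - i) (pvGet2 matrix i j)) acc)
        (List.replicate matrix.length (List.replicate matrix.length 0))) i j * ((i : Int) + (j : Int)))) acc)
          (List.replicate matrix.length (List.replicate matrix.length 0)) := rfl
  rw [hA, pvAlt_closed]
  apply List.ext_getElem
  · rw [trS.1]; simp
  · intro r h1 h2
    have hr : r < matrix.length := by simpa using h2
    apply List.ext_getElem
    · rw [trS.2 _ (List.getElem_mem h1)]
      simp
    · intro c hc1 hc2
      have hcn : c < matrix.length := by
        have hrowlen := trS.2 _ (List.getElem_mem h1)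
        omega
      simp only [List.getElem_map, List.getElem_range]
      rw [← pvGet2_eq_getElem h1 hc1, trG r c, if_pos ⟨by omega, hcn⟩,
        rotG r c, if_pos ⟨by omega, hcn, by omega⟩]
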